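-- pv_equiv track=rewrite | github.com/gcottrell13/Baba | proto/src/parse_sentences.py | get_word_chains
-- ===== SOURCE A (Python) =====
-- Grid = list[list[str | None]]
--
-- def get_word_chains(grid: Grid, words: set[str]) -> list[list[str]]:
--     """grid: a list of columns grid[x][y] where x increases to the right and y increases down"""
--     starts = []
--     for x, col in enumerate(grid):
--         for y, word in enumerate(col):
--             if word not in words:
--                 continue
--
--             if x < len(grid) - 2 and grid[x + 1][y] in words:
--                 starts.append((x, y, 'right'))
--             if y < len(grid[x]) - 2 and grid[x][y + 1] in words:
--                 starts.append((x, y, 'down'))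
--
--     consumed = set()
--     chains = []
--     for x, y, dir in starts:
--         chain = []
--         while x < len(grid) and y < len(grid[x]) and grid[x][y] in words:
--             m = (x, y, dir)
--             if m in consumed:
--                 break
--             consumed.add(m)
--             chain.append(grid[x][y])
--             if dir == 'down':
--                 y += 1
--             elif dir == 'right':
--                 x += 1
--         else:
--             chains.append(chain)
--     return chains
-- ===== SOURCE B (Python) =====
-- def get_word_chains(grid, words):
--     """Single pass: at each word cell, emit the rightward/downward run it leads;
--     a local predecessor test replaces A's starts list and consumed-set dedup."""
--     chains = []
--     n = len(grid)
--     for x, col in enumerate(grid):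
--         for y, word in enumerate(col):
--             if word not in words:
--                 continue
--             if (x < n - 2 and grid[x + 1][y] in words
--                     and (x == 0 or y >= len(grid[x - 1]) or grid[x - 1][y] not in words)):
--                 chain = []
--                 i = x
--                 while i < n and y < len(grid[i]) and grid[i][y] in words:
--                     chain.append(grid[i][y])
--                     i += 1
--                 chains.append(chain)
--             if (y < len(col) - 2 and col[y + 1] in words
--                     and (y == 0 or col[y - 1] not in words)):
--                 chain = []
--                 j = y
--                 while j < len(col) and col[j] in words:
--                     chain.append(col[j])
--                     j += 1
--                 chains.append(chain)
--     return chains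
-- ===== Notes on version B (the rewrite author's own statement) =====
-- stated objective: simpler
-- what changed: B replaces A's two-phase algorithm (collect a starts list, then re-scan it with a consumed-set that drops chains whose first cell was already walked) by a single pass that emits, at each word cell, the full rightward/downward run exactly when a local predecessor test shows the cell leads its run, so the starts list and the consumed set disappear.
import Mathlib
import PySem

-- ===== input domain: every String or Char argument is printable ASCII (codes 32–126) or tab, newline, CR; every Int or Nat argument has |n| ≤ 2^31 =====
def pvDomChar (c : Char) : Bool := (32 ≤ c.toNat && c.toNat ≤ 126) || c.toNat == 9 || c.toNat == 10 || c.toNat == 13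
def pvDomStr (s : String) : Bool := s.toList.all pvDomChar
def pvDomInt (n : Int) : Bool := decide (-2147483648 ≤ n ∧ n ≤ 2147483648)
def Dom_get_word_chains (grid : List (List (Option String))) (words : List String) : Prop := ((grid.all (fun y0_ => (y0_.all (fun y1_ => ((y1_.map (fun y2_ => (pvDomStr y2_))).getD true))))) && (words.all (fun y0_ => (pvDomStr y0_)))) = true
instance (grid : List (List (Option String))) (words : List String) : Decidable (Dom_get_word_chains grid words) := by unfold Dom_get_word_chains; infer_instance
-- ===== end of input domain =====

-- B is a single pass over the grid emitting, at each run-leading cell, the whole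
-- rightward/downward run (a local predecessor test replaces A's starts list and
-- consumed-set dedup); objective: simpler.  Equality of return values is proved;
-- Pre_ excludes only the jagged grids on which Python A raises IndexError.

-- shared vocabulary: enumerate, cell lookup (out of range = no cell), membership
def pvEnum {α : Type} : Nat → List α → List (Nat × α)
  | _, [] => []
  | i, a :: l => (i, a) :: pvEnum (i + 1) l

def pvCell (grid : List (List (Option String))) (x y : Nat) : Option String :=
  (grid.getD x []).getD y none

def pvIsWord (words : List String) : Option String → Bool
  | some w => words.contains w
  | none => false

-- ===== PORT A =====
-- builds the starts list exactly as A's first nested loop does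
def pvStartsA (grid : List (List (Option String))) (words : List String) : List (Nat × Nat × String) :=
  (pvEnum 0 grid).foldl (fun starts p =>
    (pvEnum 0 p.2).foldl (fun starts q =>
      if !(pvIsWord words q.2) then starts
      else
        let starts := if decide (p.1 < grid.length - 2) && pvIsWord words (pvCell grid (p.1 + 1) q.1)
                      then starts ++ [(p.1, q.1, "right")] else starts
        if decide (q.1 < p.2.length - 2) && pvIsWord words (pvCell grid p.1 (q.1 + 1))
        then starts ++ [(p.1, q.1, "down")] else starts) starts) []

-- A's while loop; pvCell = some w means exactly Python's x < len(grid) and y < len(grid[x]);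
-- Bool result true = exited by break (chain dropped); fuel is always sufficient at the call site
def pvWalkA (grid : List (List (Option String))) (words : List String) :
    Nat → PySem.Set (Nat × Nat × String) → Nat → Nat → String → List String →
    (PySem.Set (Nat × Nat × String) × List String × Bool)
  | 0, consumed, _, _, _, chain => (consumed, chain, true)
  | fuel + 1, consumed, x, y, dir, chain =>
    match pvCell grid x y with
    | some w =>
      if words.contains w then
        if PySem.Set.contains consumed (x, y, dir) then (consumed, chain, true)
        else
          let consumed := PySem.Set.add consumed (x, y, dir)
          let chain := chain ++ [w]
          if dir == "down" then pvWalkA grid words fuel consumed x (y + 1) dir chain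
          else if dir == "right" then pvWalkA grid words fuel consumed (x + 1) y dir chain
          else pvWalkA grid words fuel consumed x y dir chain
      else (consumed, chain, false)
    | none => (consumed, chain, false)

def get_word_chains (grid : List (List (Option String))) (words : List String) : List (List String) :=
  -- fuel = len(grid) + max column length + 1 always exceeds the remaining steps of the while loop
  ((pvStartsA grid words).foldl (fun st s =>
      let r := pvWalkA grid words (grid.length + grid.foldl (fun m c => max m c.length) 0 + 1)
        st.1 s.1 s.2.1 s.2.2 []
      (r.1, if r.2.2 then st.2 else st.2 ++ [r.2.1]))
    ((PySem.Set.empty : PySem.Set (Nat × Nat × String)), [])).2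

-- ===== PORT B =====
-- lemma needed by the ports' walks for termination
theorem pvCell_some_lt {grid : List (List (Option String))} {x y : Nat} {w : String}
    (h : pvCell grid x y = some w) : x < grid.length ∧ y < (grid.getD x []).length := by
  unfold pvCell at h
  constructor
  · by_contra hx; push_neg at hx
    rw [show grid.getD x [] = [] from List.getD_eq_default _ _ hx] at h
    simp at h
  · by_contra hy; push_neg at hy
    rw [List.getD_eq_default _ _ hy] at h
    simp at h

def pvRunRight (grid : List (List (Option String))) (words : List String) (x y : Nat) : List String :=
  match h : pvCell grid x y with
  | some w => if words.contains w then w :: pvRunRight grid words (x + 1) y else []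
  | none => []
termination_by grid.length - x
decreasing_by have := (pvCell_some_lt h).1; omega

def pvRunDown (col : List (Option String)) (words : List String) (y : Nat) : List String :=
  if hy : y < col.length then
    match col.getD y none with
    | some w => if words.contains w then w :: pvRunDown col words (y + 1) else []
    | none => []
  else []
termination_by col.length - y
decreasing_by omega

def get_word_chains_alt (grid : List (List (Option String))) (words : List String) : List (List String) :=
  (pvEnum 0 grid).foldl (fun chains p =>
    (pvEnum 0 p.2).foldl (fun chains q =>
      if !(pvIsWord words q.2) then chains
      else
        let chains :=
          if decide (p.1 < grid.length - 2) && pvIsWord words (pvCell grid (p.1 + 1) q.1)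
             && (p.1 == 0 || decide ((grid.getD (p.1 - 1) []).length ≤ q.1)
                 || !(pvIsWord words (pvCell grid (p.1 - 1) q.1)))
          then chains ++ [pvRunRight grid words p.1 q.1] else chains
        if decide (q.1 < p.2.length - 2) && pvIsWord words (p.2.getD (q.1 + 1) none)
           && (q.1 == 0 || !(pvIsWord words (p.2.getD (q.1 - 1) none)))
        then chains ++ [pvRunDown p.2 words q.1] else chains) chains) []

-- ===== PRECONDITION & SPEC =====
-- Pre_ excludes exactly the inputs where Python A raises IndexError: a word cell (x,y)
-- with x < len(grid)-2 whose right-neighbour column is shorter than y+1.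
def Pre_get_word_chains (grid : List (List (Option String))) (words : List String) : Prop :=
  ∀ x < grid.length, ∀ y < (grid.getD x []).length,
    x + 2 < grid.length → pvIsWord words (pvCell grid x y) = true →
      y < (grid.getD (x + 1) []).length
instance (grid : List (List (Option String))) (words : List String) : Decidable (Pre_get_word_chains grid words) := by unfold Pre_get_word_chains; infer_instance

def pvWitness_get_word_chains : List (List (Option String)) × List String :=
  ([[some "baba"], [some "is"], [some "you"]], ["baba", "is", "you"])

def Spec_get_word_chains (grid : List (List (Option String))) (words : List String) (out : List (List String)) : Prop := out = get_word_chains_alt grid words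
instance (grid : List (List (Option String))) (words : List String) (out : List (List String)) : Decidable (Spec_get_word_chains grid words out) := by unfold Spec_get_word_chains; infer_instance

-- ===== CLAIM (what is proved, stated in full; the proofs are below) =====
def Claim_equal_get_word_chains : Prop := ∀ (grid : List (List (Option String))) (words : List String), Dom_get_word_chains grid words → Pre_get_word_chains grid words → Spec_get_word_chains grid words (get_word_chains grid words)

-- ===== LEMMAS AND PROOFS =====

-- word test and column length at a coordinate
def pvW (g : List (List (Option String))) (w : List String) (x y : Nat) : Bool :=
  pvIsWord w (pvCell g x y)
def pvL (g : List (List (Option String))) (x : Nat) : Nat := (g.getD x []).length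

theorem pvW_iff {g : List (List (Option String))} {w : List String} {x y : Nat} :
    pvW g w x y = true ↔ ∃ s, pvCell g x y = some s ∧ w.contains s = true := by
  unfold pvW pvIsWord
  cases h : pvCell g x y <;> simp

theorem pvW_lt {g : List (List (Option String))} {w : List String} {x y : Nat}
    (h : pvW g w x y = true) : x < g.length ∧ y < pvL g x := by
  obtain ⟨s, hc, -⟩ := pvW_iff.mp h
  exact pvCell_some_lt hc

-- start / run-leading predicates (right and down)
def pvSR (g : List (List (Option String))) (w : List String) (x y : Nat) : Prop :=
  pvW g w x y = true ∧ x + 2 < g.length ∧ pvW g w (x + 1) y = true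
def pvSD (g : List (List (Option String))) (w : List String) (x y : Nat) : Prop :=
  pvW g w x y = true ∧ y + 2 < pvL g x ∧ pvW g w x (y + 1) = true
def pvLR (g : List (List (Option String))) (w : List String) (x y : Nat) : Prop :=
  x = 0 ∨ pvW g w (x - 1) y = false
def pvLD (g : List (List (Option String))) (w : List String) (x y : Nat) : Prop :=
  y = 0 ∨ pvW g w x (y - 1) = false

def pvRlen (g : List (List (Option String))) (w : List String) (x y : Nat) : Nat :=
  (pvRunRight g w x y).length
def pvDlen (g : List (List (Option String))) (w : List String) (x y : Nat) : Nat :=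
  (pvRunDown (g.getD x []) w y).length

-- run unfolding lemmas
theorem runRight_cons {g : List (List (Option String))} {w : List String} {x y : Nat} {s : String}
    (hc : pvCell g x y = some s) (hw : w.contains s = true) :
    pvRunRight g w x y = s :: pvRunRight g w (x + 1) y := by
  rw [pvRunRight.eq_def]
  split
  · rename_i s' heq
    obtain rfl : s = s' := by rw [hc] at heq; exact Option.some.inj heq
    rw [if_pos hw]
  · rename_i heq; rw [heq] at hc; cases hc

theorem runRight_nil {g : List (List (Option String))} {w : List String} {x y : Nat}
    (h : pvW g w x y = false) : pvRunRight g w x y = [] := by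
  rw [pvRunRight.eq_def]
  split
  · rename_i s' heq
    unfold pvW pvIsWord at h
    rw [heq] at h
    have h' : w.contains s' = false := h
    rw [if_neg (by simpa using h')]
  · rfl

theorem runDown_cons {col : List (Option String)} {w : List String} {y : Nat} {s : String}
    (hc : col.getD y none = some s) (hw : w.contains s = true) :
    pvRunDown col w y = s :: pvRunDown col w (y + 1) := by
  have hy : y < col.length := by
    by_contra hy
    rw [List.getD_eq_default _ _ (by omega)] at hc
    cases hc
  rw [pvRunDown.eq_def, dif_pos hy]
  simp only [hc, hw, if_pos]

theorem runDown_nil {col : List (Option String)} {w : List String} {y : Nat}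
    (h : pvIsWord w (col.getD y none) = false) : pvRunDown col w y = [] := by
  rw [pvRunDown.eq_def]
  split
  · cases hc : col.getD y none with
    | none => simp [hc]
    | some s =>
      unfold pvIsWord at h
      rw [hc] at h
      have h' : w.contains s = false := h
      simp [hc]; simpa using h'
  · rfl

theorem runR_W {g : List (List (Option String))} {w : List String} {y : Nat} :
    ∀ (i x : Nat), i < pvRlen g w x y → pvW g w (x + i) y = true := by
  intro i
  induction i with
  | zero =>
    intro x h
    cases hW : pvW g w x y with
    | false => rw [pvRlen, runRight_nil hW] at h; simp at h
    | true => simpa using hW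
  | succ i ih =>
    intro x h
    cases hW : pvW g w x y with
    | false => rw [pvRlen, runRight_nil hW] at h; simp at h
    | true =>
      obtain ⟨s, hc, hw⟩ := pvW_iff.mp hW
      rw [pvRlen, runRight_cons hc hw] at h
      have := ih (x + 1) (by rw [pvRlen]; simpa using Nat.lt_of_succ_lt_succ h)
      rwa [show x + 1 + i = x + (i + 1) by omega] at this

theorem runR_ge {g : List (List (Option String))} {w : List String} {y : Nat} :
    ∀ (k x : Nat), (∀ j, j ≤ k → pvW g w (x + j) y = true) → k < pvRlen g w x y := by
  intro k
  induction k with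
  | zero =>
    intro x h
    obtain ⟨s, hc, hw⟩ := pvW_iff.mp (by simpa using h 0 le_rfl)
    rw [pvRlen, runRight_cons hc hw]
    simp
  | succ k ih =>
    intro x h
    obtain ⟨s, hc, hw⟩ := pvW_iff.mp (by simpa using h 0 (by omega))
    rw [pvRlen, runRight_cons hc hw]
    have := ih (x + 1) (fun j hj => by
      have := h (j + 1) (by omega)
      rwa [show x + (j + 1) = x + 1 + j by omega] at this)
    rw [pvRlen] at this
    simpa using Nat.succ_lt_succ this

theorem pvW_down {g : List (List (Option String))} {w : List String} {x y : Nat} :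
    pvW g w x y = pvIsWord w ((g.getD x []).getD y none) := rfl

theorem runD_W {g : List (List (Option String))} {w : List String} {x : Nat} :
    ∀ (j y : Nat), j < pvDlen g w x y → pvW g w x (y + j) = true := by
  intro j
  induction j with
  | zero =>
    intro y h
    cases hW : pvW g w x y with
    | false => rw [pvDlen, runDown_nil (by rw [pvW_down] at hW; exact hW)] at h; simp at h
    | true => simpa using hW
  | succ j ih =>
    intro y h
    cases hW : pvW g w x y with
    | false => rw [pvDlen, runDown_nil (by rw [pvW_down] at hW; exact hW)] at h; simp at h
    | true =>
      obtain ⟨s, hc, hw⟩ := pvW_iff.mp hW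
      rw [pvDlen, runDown_cons hc hw] at h
      have := ih (y + 1) (by rw [pvDlen]; simpa using Nat.lt_of_succ_lt_succ h)
      rwa [show y + 1 + j = y + (j + 1) by omega] at this

theorem runD_ge {g : List (List (Option String))} {w : List String} {x : Nat} :
    ∀ (k y : Nat), (∀ j, j ≤ k → pvW g w x (y + j) = true) → k < pvDlen g w x y := by
  intro k
  induction k with
  | zero =>
    intro y h
    obtain ⟨s, hc, hw⟩ := pvW_iff.mp (by simpa using h 0 le_rfl)
    rw [pvDlen, runDown_cons hc hw]
    simp
  | succ k ih =>
    intro y h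
    obtain ⟨s, hc, hw⟩ := pvW_iff.mp (by simpa using h 0 (by omega))
    rw [pvDlen, runDown_cons hc hw]
    have := ih (y + 1) (fun j hj => by
      have := h (j + 1) (by omega)
      rwa [show y + (j + 1) = y + 1 + j by omega] at this)
    rw [pvDlen] at this
    simpa using Nat.succ_lt_succ this

-- run starts (leftmost / topmost word cell of the contiguous run through a cell)
def pvRsR (g : List (List (Option String))) (w : List String) (y : Nat) : Nat → Nat
  | 0 => 0
  | x + 1 => if pvW g w x y = true then pvRsR g w y x else x + 1

def pvRsD (g : List (List (Option String))) (w : List String) (x : Nat) : Nat → Nat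
  | 0 => 0
  | y + 1 => if pvW g w x y = true then pvRsD g w x y else y + 1

theorem rsR_le {g : List (List (Option String))} {w : List String} {y : Nat} :
    ∀ x, pvRsR g w y x ≤ x := by
  intro x
  induction x with
  | zero => simp [pvRsR]
  | succ n ih => rw [pvRsR]; split <;> omega
theorem rsR_LR {g : List (List (Option String))} {w : List String} {y : Nat} :
    ∀ x, pvLR g w (pvRsR g w y x) y := by
  intro x
  induction x with
  | zero => exact Or.inl rfl
  | succ n ih =>
    rw [pvRsR]
    by_cases h : pvW g w n y = true
    · simpa [h] using ih
    · simp only [h, if_false]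
      exact Or.inr (by simpa using h)
theorem rsR_W {g : List (List (Option String))} {w : List String} {y : Nat} :
    ∀ x, pvW g w x y = true → ∀ j, pvRsR g w y x ≤ j → j ≤ x → pvW g w j y = true := by
  intro x
  induction x with
  | zero =>
    intro hW j h1 h2
    obtain rfl : j = 0 := by omega
    exact hW
  | succ n ih =>
    intro hW j h1 h2
    by_cases h : pvW g w n y = true
    · rw [pvRsR, if_pos h] at h1
      rcases Nat.lt_or_ge j (n + 1) with hj | hj
      · exact ih h j h1 (by omega)
      · obtain rfl : j = n + 1 := by omega
        exact hW
    · rw [pvRsR, if_neg h] at h1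
      obtain rfl : j = n + 1 := by omega
      exact hW
theorem rsR_lt {g : List (List (Option String))} {w : List String} {y x : Nat}
    (hx : 1 ≤ x) (h : pvW g w (x - 1) y = true) : pvRsR g w y x < x := by
  obtain ⟨n, rfl⟩ : ∃ n, x = n + 1 := ⟨x - 1, by omega⟩
  rw [pvRsR, if_pos (by simpa using h)]
  have := rsR_le (g := g) (w := w) (y := y) n
  omega

theorem rsD_le {g : List (List (Option String))} {w : List String} {x : Nat} :
    ∀ y, pvRsD g w x y ≤ y := by
  intro y
  induction y with
  | zero => simp [pvRsD]
  | succ n ih => rw [pvRsD]; split <;> omega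
theorem rsD_LD {g : List (List (Option String))} {w : List String} {x : Nat} :
    ∀ y, pvLD g w x (pvRsD g w x y) := by
  intro y
  induction y with
  | zero => exact Or.inl rfl
  | succ n ih =>
    rw [pvRsD]
    by_cases h : pvW g w x n = true
    · simpa [h] using ih
    · simp only [h, if_false]
      exact Or.inr (by simpa using h)
theorem rsD_W {g : List (List (Option String))} {w : List String} {x : Nat} :
    ∀ y, pvW g w x y = true → ∀ j, pvRsD g w x y ≤ j → j ≤ y → pvW g w x j = true := by
  intro y
  induction y with
  | zero =>
    intro hW j h1 h2
    obtain rfl : j = 0 := by omega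
    exact hW
  | succ n ih =>
    intro hW j h1 h2
    by_cases h : pvW g w x n = true
    · rw [pvRsD, if_pos h] at h1
      rcases Nat.lt_or_ge j (n + 1) with hj | hj
      · exact ih h j h1 (by omega)
      · obtain rfl : j = n + 1 := by omega
        exact hW
    · rw [pvRsD, if_neg h] at h1
      obtain rfl : j = n + 1 := by omega
      exact hW
theorem rsD_lt {g : List (List (Option String))} {w : List String} {x y : Nat}
    (hy : 1 ≤ y) (h : pvW g w x (y - 1) = true) : pvRsD g w x y < y := by
  obtain ⟨n, rfl⟩ : ∃ n, y = n + 1 := ⟨y - 1, by omega⟩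
  rw [pvRsD, if_pos (by simpa using h)]
  have := rsD_le (g := g) (w := w) (x := x) n
  omega

-- what the consumed set contains when the scan has reached boundary cell (X, Y)
def pvCR (g : List (List (Option String))) (w : List String) (X Y x y : Nat) : Prop :=
  ∃ x0, (x0 < X ∨ (x0 = X ∧ y < Y)) ∧ pvSR g w x0 y ∧ pvLR g w x0 y ∧
    x0 ≤ x ∧ x < x0 + pvRlen g w x0 y
def pvCD (g : List (List (Option String))) (w : List String) (X Y x y : Nat) : Prop :=
  ∃ y0, (x < X ∨ (x = X ∧ y0 < Y)) ∧ pvSD g w x y0 ∧ pvLD g w x y0 ∧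
    y0 ≤ y ∧ y < y0 + pvDlen g w x y0
def pvInv (g : List (List (Option String))) (w : List String)
    (C : PySem.Set (Nat × Nat × String)) (X Y : Nat) : Prop :=
  ∀ x y d, ((x, y, d) ∈ C ↔ (d = "right" ∧ pvCR g w X Y x y) ∨ (d = "down" ∧ pvCD g w X Y x y))

-- geometric facts about the consumed set
theorem CR_free {g : List (List (Option String))} {w : List String} {X Y : Nat}
    (hL : pvLR g w X Y) (i : Nat) : ¬ pvCR g w X Y (X + i) Y := by
  rintro ⟨x0, hproc, hS0, hL0, hle, hlt⟩
  have hx0 : x0 < X := by rcases hproc with h | ⟨_, h⟩ <;> omega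
  rcases hL with h0 | hF
  · omega
  · have hj : X - 1 - x0 < pvRlen g w x0 Y := by omega
    have hW := runR_W (X - 1 - x0) x0 hj
    rw [show x0 + (X - 1 - x0) = X - 1 by omega] at hW
    rw [hW] at hF
    cases hF

theorem CR_hit {g : List (List (Option String))} {w : List String} {X Y : Nat}
    (hS : pvSR g w X Y) (hnL : ¬ pvLR g w X Y) : pvCR g w X Y X Y := by
  unfold pvLR at hnL
  push_neg at hnL
  obtain ⟨hX0, hWp⟩ := hnL
  have hX1 : 1 ≤ X := by omega
  have hWp : pvW g w (X - 1) Y = true := by simpa using hWp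
  have hlt : pvRsR g w Y X < X := rsR_lt hX1 hWp
  have hcont : ∀ j, pvRsR g w Y X ≤ j → j ≤ X → pvW g w j Y = true := rsR_W X hS.1
  refine ⟨pvRsR g w Y X, Or.inl hlt, ⟨hcont _ le_rfl (by omega), ?_, ?_⟩, rsR_LR X, by omega, ?_⟩
  · have := hS.2.1; omega
  · exact hcont _ (by omega) (by omega)
  · have := runR_ge (X - pvRsR g w Y X) (pvRsR g w Y X) (fun j hj => by
      have := hcont (pvRsR g w Y X + j) (by omega) (by omega)
      exact this)
    omega

theorem CD_free {g : List (List (Option String))} {w : List String} {X Y : Nat}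
    (hL : pvLD g w X Y) (j : Nat) : ¬ pvCD g w X Y X (Y + j) := by
  rintro ⟨y0, hproc, hS0, hL0, hle, hlt⟩
  have hy0 : y0 < Y := by rcases hproc with h | ⟨_, h⟩ <;> omega
  rcases hL with h0 | hF
  · omega
  · have hj : Y - 1 - y0 < pvDlen g w X y0 := by omega
    have hW := runD_W (Y - 1 - y0) y0 hj
    rw [show y0 + (Y - 1 - y0) = Y - 1 by omega] at hW
    rw [hW] at hF
    cases hF

theorem CD_hit {g : List (List (Option String))} {w : List String} {X Y : Nat}
    (hS : pvSD g w X Y) (hnL : ¬ pvLD g w X Y) : pvCD g w X Y X Y := by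
  unfold pvLD at hnL
  push_neg at hnL
  obtain ⟨hY0, hWp⟩ := hnL
  have hY1 : 1 ≤ Y := by omega
  have hWp : pvW g w X (Y - 1) = true := by simpa using hWp
  have hlt : pvRsD g w X Y < Y := rsD_lt hY1 hWp
  have hcont : ∀ j, pvRsD g w X Y ≤ j → j ≤ Y → pvW g w X j = true := rsD_W Y hS.1
  refine ⟨pvRsD g w X Y, Or.inr ⟨rfl, hlt⟩, ⟨hcont _ le_rfl (by omega), ?_, ?_⟩, rsD_LD Y, by omega, ?_⟩
  · have := hS.2.1; omega
  · exact hcont _ (by omega) (by omega)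
  · have := runD_ge (Y - pvRsD g w X Y) (pvRsD g w X Y) (fun j hj => by
      exact hcont (pvRsD g w X Y + j) (by omega) (by omega))
    omega

-- how the spec moves across one cell / one column boundary
theorem CR_succ {g : List (List (Option String))} {w : List String} {X Y x y : Nat} :
    pvCR g w X (Y + 1) x y ↔
      pvCR g w X Y x y ∨ (pvSR g w X Y ∧ pvLR g w X Y ∧ y = Y ∧ X ≤ x ∧ x < X + pvRlen g w X Y) := by
  constructor
  · rintro ⟨x0, hproc, hS0, hL0, hle, hlt⟩
    rcases hproc with h | ⟨rfl, hy⟩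
    · exact Or.inl ⟨x0, Or.inl h, hS0, hL0, hle, hlt⟩
    · rcases Nat.lt_or_ge y Y with hy' | hy'
      · exact Or.inl ⟨x0, Or.inr ⟨rfl, hy'⟩, hS0, hL0, hle, hlt⟩
      · obtain rfl : y = Y := by omega
        exact Or.inr ⟨hS0, hL0, rfl, hle, hlt⟩
  · rintro (⟨x0, hproc, hS0, hL0, hle, hlt⟩ | ⟨hS, hL, rfl, hle, hlt⟩)
    · refine ⟨x0, ?_, hS0, hL0, hle, hlt⟩
      rcases hproc with h | ⟨rfl, hy⟩
      · exact Or.inl h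
      · exact Or.inr ⟨rfl, by omega⟩
    · exact ⟨X, Or.inr ⟨rfl, by omega⟩, hS, hL, hle, hlt⟩

theorem CD_succ {g : List (List (Option String))} {w : List String} {X Y x y : Nat} :
    pvCD g w X (Y + 1) x y ↔
      pvCD g w X Y x y ∨ (pvSD g w X Y ∧ pvLD g w X Y ∧ x = X ∧ Y ≤ y ∧ y < Y + pvDlen g w X Y) := by
  constructor
  · rintro ⟨y0, hproc, hS0, hL0, hle, hlt⟩
    rcases hproc with h | ⟨rfl, hy⟩
    · exact Or.inl ⟨y0, Or.inl h, hS0, hL0, hle, hlt⟩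
    · rcases Nat.lt_or_ge y0 Y with hy' | hy'
      · exact Or.inl ⟨y0, Or.inr ⟨rfl, hy'⟩, hS0, hL0, hle, hlt⟩
      · obtain rfl : y0 = Y := by omega
        exact Or.inr ⟨hS0, hL0, rfl, hle, hlt⟩
  · rintro (⟨y0, hproc, hS0, hL0, hle, hlt⟩ | ⟨hS, hL, rfl, hle, hlt⟩)
    · refine ⟨y0, ?_, hS0, hL0, hle, hlt⟩
      rcases hproc with h | ⟨rfl, hy⟩
      · exact Or.inl h
      · exact Or.inr ⟨rfl, by omega⟩
    · exact ⟨Y, Or.inr ⟨rfl, by omega⟩, hS, hL, hle, hlt⟩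

theorem CR_col_end {g : List (List (Option String))} {w : List String} {X Y x y : Nat}
    (hY : pvL g X ≤ Y) : pvCR g w X Y x y ↔ pvCR g w (X + 1) 0 x y := by
  constructor
  · rintro ⟨x0, hproc, hS0, hL0, hle, hlt⟩
    exact ⟨x0, Or.inl (by rcases hproc with h | ⟨rfl, _⟩ <;> omega), hS0, hL0, hle, hlt⟩
  · rintro ⟨x0, hproc, hS0, hL0, hle, hlt⟩
    have hx0X : x0 ≤ X := by rcases hproc with h | ⟨_, h⟩ <;> omega
    rcases Nat.lt_or_ge x0 X with h | h
    · exact ⟨x0, Or.inl h, hS0, hL0, hle, hlt⟩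
    · obtain rfl : x0 = X := by omega
      have := (pvW_lt hS0.1).2
      exact ⟨x0, Or.inr ⟨rfl, by omega⟩, hS0, hL0, hle, hlt⟩

theorem CD_col_end {g : List (List (Option String))} {w : List String} {X Y x y : Nat}
    (hY : pvL g X ≤ Y) : pvCD g w X Y x y ↔ pvCD g w (X + 1) 0 x y := by
  constructor
  · rintro ⟨y0, hproc, hS0, hL0, hle, hlt⟩
    exact ⟨y0, Or.inl (by rcases hproc with h | ⟨rfl, _⟩ <;> omega), hS0, hL0, hle, hlt⟩
  · rintro ⟨y0, hproc, hS0, hL0, hle, hlt⟩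
    have hxX : x ≤ X := by rcases hproc with h | ⟨h, _⟩ <;> omega
    rcases Nat.lt_or_ge x X with h | h
    · exact ⟨y0, Or.inl h, hS0, hL0, hle, hlt⟩
    · obtain rfl : x = X := by omega
      have := (pvW_lt hS0.1).2
      exact ⟨y0, Or.inr ⟨rfl, by omega⟩, hS0, hL0, hle, hlt⟩

-- A's while loop: break on a consumed first cell / full run when no cell is consumed
theorem walk_break {g : List (List (Option String))} {w : List String} {fuel : Nat}
    {C : PySem.Set (Nat × Nat × String)} {x y : Nat} {d : String} {ch : List String}
    (hW : pvW g w x y = true) (hC : (x, y, d) ∈ C) :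
    pvWalkA g w (fuel + 1) C x y d ch = (C, ch, true) := by
  obtain ⟨s, hc, hw⟩ := pvW_iff.mp hW
  have hsw : s ∈ w := by simpa using hw
  simp only [pvWalkA]
  rw [hc]
  simp [hsw, hC]

theorem walk_right {g : List (List (Option String))} {w : List String} {y : Nat} :
    ∀ (fuel x : Nat) (C : PySem.Set (Nat × Nat × String)) (ch : List String),
    g.length - x < fuel → (∀ i, (x + i, y, "right") ∉ C) →
    ∃ C', pvWalkA g w fuel C x y "right" ch = (C', ch ++ pvRunRight g w x y, false) ∧
      ∀ a b d, ((a, b, d) ∈ C' ↔ (a, b, d) ∈ C ∨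
        (d = "right" ∧ b = y ∧ x ≤ a ∧ a < x + pvRlen g w x y)) := by
  intro fuel
  induction fuel with
  | zero => intro x C ch hf; omega
  | succ fuel ih =>
    intro x C ch hf hfree
    by_cases hW : pvW g w x y = true
    · obtain ⟨s, hc, hw⟩ := pvW_iff.mp hW
      have hxlt := (pvCell_some_lt hc).1
      have hfree' : ∀ i, (x + 1 + i, y, "right") ∉ (PySem.Set.add C (x, y, "right")) := by
        intro i hmem
        rw [PySem.Set.mem_add] at hmem
        rcases hmem with hmem | hmem
        · exact hfree (i + 1) (by rw [show x + (i + 1) = x + 1 + i by omega]; exact hmem)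
        · simp [Prod.ext_iff] at hmem; omega
      obtain ⟨C', heq, hmem⟩ := ih (x + 1) (PySem.Set.add C (x, y, "right")) (ch ++ [s]) (by omega) hfree'
      refine ⟨C', ?_, ?_⟩
      · have hsw : s ∈ w := by simpa using hw
        have hm0 : (x, y, "right") ∉ C := by simpa using hfree 0
        simp only [pvWalkA]
        rw [hc]
        rw [PySem.Set.add_of_not_mem hm0] at heq
        simp [hsw, hm0, heq, runRight_cons hc hw]
      · intro a b d
        have hr : pvRlen g w x y = pvRlen g w (x + 1) y + 1 := by
          unfold pvRlen; rw [runRight_cons hc hw]; simp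
        rw [hmem a b d, PySem.Set.mem_add]
        constructor
        · rintro ((hm | hm) | ⟨rfl, rfl, h1, h2⟩)
          · exact Or.inl hm
          · simp only [Prod.ext_iff] at hm
            obtain ⟨rfl, rfl, rfl⟩ := hm
            exact Or.inr ⟨rfl, rfl, le_rfl, by omega⟩
          · exact Or.inr ⟨rfl, rfl, by omega, by omega⟩
        · rintro (hm | ⟨rfl, rfl, h1, h2⟩)
          · exact Or.inl (Or.inl hm)
          · rcases Nat.lt_or_ge x a with ha | ha
            · exact Or.inr ⟨rfl, rfl, by omega, by omega⟩
            · obtain rfl : a = x := by omega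
              exact Or.inl (Or.inr (by simp))
    · have hW' : pvW g w x y = false := by simpa using hW
      have hlen : pvRlen g w x y = 0 := by unfold pvRlen; rw [runRight_nil hW']; rfl
      refine ⟨C, ?_, ?_⟩
      · unfold pvW pvIsWord at hW'
        simp only [pvWalkA]
        cases hc : pvCell g x y with
        | none => rw [runRight_nil hW']; simp
        | some s =>
          rw [hc] at hW'
          have h' : w.contains s = false := hW'
          have hns : s ∉ w := by simpa using h'
          rw [runRight_nil (by unfold pvW pvIsWord; rw [hc]; exact h')]
          simp [hns]
      · intro a b d
        constructor
        · exact Or.inl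
        · rintro (hm | ⟨_, _, h1, h2⟩)
          · exact hm
          · omega

theorem walk_down {g : List (List (Option String))} {w : List String} {x : Nat} :
    ∀ (fuel y : Nat) (C : PySem.Set (Nat × Nat × String)) (ch : List String),
    pvL g x - y < fuel → (∀ j, (x, y + j, "down") ∉ C) →
    ∃ C', pvWalkA g w fuel C x y "down" ch = (C', ch ++ pvRunDown (g.getD x []) w y, false) ∧
      ∀ a b d, ((a, b, d) ∈ C' ↔ (a, b, d) ∈ C ∨
        (d = "down" ∧ a = x ∧ y ≤ b ∧ b < y + pvDlen g w x y)) := by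
  intro fuel
  induction fuel with
  | zero => intro y C ch hf; omega
  | succ fuel ih =>
    intro y C ch hf hfree
    by_cases hW : pvW g w x y = true
    · obtain ⟨s, hc, hw⟩ := pvW_iff.mp hW
      have hylt := (pvCell_some_lt hc).2
      have hfree' : ∀ j, (x, y + 1 + j, "down") ∉ (PySem.Set.add C (x, y, "down")) := by
        intro j hmem
        rw [PySem.Set.mem_add] at hmem
        rcases hmem with hmem | hmem
        · exact hfree (j + 1) (by rw [show y + (j + 1) = y + 1 + j by omega]; exact hmem)
        · simp [Prod.ext_iff] at hmem; omega
      obtain ⟨C', heq, hmem⟩ := ih (y + 1) (PySem.Set.add C (x, y, "down")) (ch ++ [s]) (by unfold pvL at *; omega) hfree'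
      refine ⟨C', ?_, ?_⟩
      · have hsw : s ∈ w := by simpa using hw
        have hm0 : (x, y, "down") ∉ C := by simpa using hfree 0
        simp only [pvWalkA]
        rw [hc]
        rw [PySem.Set.add_of_not_mem hm0] at heq
        rw [show pvRunDown (g.getD x []) w y = s :: pvRunDown (g.getD x []) w (y + 1) from
          runDown_cons hc hw]
        simp [hsw, hm0, heq]
      · intro a b d
        have hr : pvDlen g w x y = pvDlen g w x (y + 1) + 1 := by
          unfold pvDlen; rw [runDown_cons hc hw]; simp
        rw [hmem a b d, PySem.Set.mem_add]
        constructor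
        · rintro ((hm | hm) | ⟨rfl, rfl, h1, h2⟩)
          · exact Or.inl hm
          · simp only [Prod.ext_iff] at hm
            obtain ⟨rfl, rfl, rfl⟩ := hm
            exact Or.inr ⟨rfl, rfl, le_rfl, by omega⟩
          · exact Or.inr ⟨rfl, rfl, by omega, by omega⟩
        · rintro (hm | ⟨rfl, rfl, h1, h2⟩)
          · exact Or.inl (Or.inl hm)
          · rcases Nat.lt_or_ge y b with hb | hb
            · exact Or.inr ⟨rfl, rfl, by omega, by omega⟩
            · obtain rfl : b = y := by omega
              exact Or.inl (Or.inr (by simp))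
    · have hW' : pvW g w x y = false := by simpa using hW
      have hlen : pvDlen g w x y = 0 := by
        unfold pvDlen; rw [runDown_nil (by rw [pvW_down] at hW'; exact hW')]; rfl
      refine ⟨C, ?_, ?_⟩
      · unfold pvW pvIsWord at hW'
        simp only [pvWalkA]
        cases hc : pvCell g x y with
        | none => rw [runDown_nil (by rw [show (g.getD x []).getD y none = pvCell g x y from rfl, hc]; rfl)]; simp
        | some s =>
          rw [hc] at hW'
          have h' : w.contains s = false := hW'
          have hns : s ∉ w := by simpa using h'
          rw [runDown_nil (by rw [show (g.getD x []).getD y none = pvCell g x y from rfl, hc]; exact h')]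
          simp [hns]
      · intro a b d
        constructor
        · exact Or.inl
        · rintro (hm | ⟨_, _, h1, h2⟩)
          · exact hm
          · omega

-- the per-cell contributions of the two ports, and the loop-shape rewrites
def pvCellStarts (g : List (List (Option String))) (w : List String)
    (x y : Nat) (word : Option String) (clen : Nat) : List (Nat × Nat × String) :=
  if !(pvIsWord w word) then [] else
    (if decide (x < g.length - 2) && pvIsWord w (pvCell g (x + 1) y) then [(x, y, "right")] else []) ++
    (if decide (y < clen - 2) && pvIsWord w (pvCell g x (y + 1)) then [(x, y, "down")] else [])

def pvCellChains (g : List (List (Option String))) (w : List String)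
    (x y : Nat) (word : Option String) (col : List (Option String)) : List (List String) :=
  if !(pvIsWord w word) then [] else
    (if decide (x < g.length - 2) && pvIsWord w (pvCell g (x + 1) y)
        && (x == 0 || decide ((g.getD (x - 1) []).length ≤ y) || !(pvIsWord w (pvCell g (x - 1) y)))
     then [pvRunRight g w x y] else []) ++
    (if decide (y < col.length - 2) && pvIsWord w (col.getD (y + 1) none)
        && (y == 0 || !(pvIsWord w (col.getD (y - 1) none)))
     then [pvRunDown col w y] else [])

def pvAStep (g : List (List (Option String))) (w : List String) (fuel : Nat) :
    (PySem.Set (Nat × Nat × String) × List (List String)) → (Nat × Nat × String) →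
    (PySem.Set (Nat × Nat × String) × List (List String)) :=
  fun st s =>
    let r := pvWalkA g w fuel st.1 s.1 s.2.1 s.2.2 []
    (r.1, if r.2.2 then st.2 else st.2 ++ [r.2.1])

theorem foldl_flatMap {α β σ : Type} (f : σ → β → σ) (h : α → List β) (l : List α) (init : σ) :
    (l.flatMap h).foldl f init = l.foldl (fun s a => (h a).foldl f s) init := by
  induction l generalizing init <;> simp [List.foldl_append, *]

theorem startsA_eq (g : List (List (Option String))) (w : List String) :
    pvStartsA g w = (pvEnum 0 g).flatMap (fun p =>
      (pvEnum 0 p.2).flatMap (fun q => pvCellStarts g w p.1 q.1 q.2 p.2.length)) := by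
  unfold pvStartsA
  have hbody : ∀ (p : Nat × List (Option String)),
      (fun (starts : List (Nat × Nat × String)) (q : Nat × Option String) =>
        if !(pvIsWord w q.2) then starts
        else
          let starts := if decide (p.1 < g.length - 2) && pvIsWord w (pvCell g (p.1 + 1) q.1)
                        then starts ++ [(p.1, q.1, "right")] else starts
          if decide (q.1 < p.2.length - 2) && pvIsWord w (pvCell g p.1 (q.1 + 1))
          then starts ++ [(p.1, q.1, "down")] else starts)
      = fun starts q => starts ++ pvCellStarts g w p.1 q.1 q.2 p.2.length := by
    intro p
    funext starts q
    by_cases h1 : pvIsWord w q.2 = true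
    · simp only [pvCellStarts, h1, Bool.not_true]
      split_ifs <;> simp
    · have h1' : pvIsWord w q.2 = false := by simpa using h1
      simp [pvCellStarts, h1']
  simp only [hbody, PySem.List.foldl_append_eq_flatMap]
  simp

theorem alt_eq (g : List (List (Option String))) (w : List String) :
    get_word_chains_alt g w = (pvEnum 0 g).flatMap (fun p =>
      (pvEnum 0 p.2).flatMap (fun q => pvCellChains g w p.1 q.1 q.2 p.2)) := by
  unfold get_word_chains_alt
  have hbody : ∀ (p : Nat × List (Option String)),
      (fun (chains : List (List String)) (q : Nat × Option String) =>
        if !(pvIsWord w q.2) then chains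
        else
          let chains :=
            if decide (p.1 < g.length - 2) && pvIsWord w (pvCell g (p.1 + 1) q.1)
               && (p.1 == 0 || decide ((g.getD (p.1 - 1) []).length ≤ q.1)
                   || !(pvIsWord w (pvCell g (p.1 - 1) q.1)))
            then chains ++ [pvRunRight g w p.1 q.1] else chains
          if decide (q.1 < p.2.length - 2) && pvIsWord w (p.2.getD (q.1 + 1) none)
             && (q.1 == 0 || !(pvIsWord w (p.2.getD (q.1 - 1) none)))
          then chains ++ [pvRunDown p.2 w q.1] else chains)
      = fun chains q => chains ++ pvCellChains g w p.1 q.1 q.2 p.2 := by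
    intro p
    funext chains q
    by_cases h1 : pvIsWord w q.2 = true
    · simp only [pvCellChains, h1, Bool.not_true]
      split_ifs <;> simp
    · have h1' : pvIsWord w q.2 = false := by simpa using h1
      simp [pvCellChains, h1']
  simp only [hbody, PySem.List.foldl_append_eq_flatMap]
  simp

-- bookkeeping
theorem drop_getD {α : Type} {l : List α} {n : Nat} {a : α} {t : List α} (d : α)
    (h : l.drop n = a :: t) : l.getD n d = a := by
  have h0 : (l.drop n)[0]? = some a := by rw [h]; rfl
  rw [List.getElem?_drop] at h0
  simp only [Nat.add_zero] at h0
  rw [List.getD_eq_getElem?_getD, h0]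
  rfl
theorem drop_succ {α : Type} {l : List α} {n : Nat} {a : α} {t : List α}
    (h : l.drop n = a :: t) : l.drop (n + 1) = t := by
  have : (l.drop n).drop 1 = t := by rw [h]; rfl
  rwa [List.drop_drop] at this
theorem foldl_max_acc (l : List (List (Option String))) (acc : Nat) :
    acc ≤ l.foldl (fun m c => max m c.length) acc := by
  induction l generalizing acc with
  | nil => exact le_rfl
  | cons c t ih => exact le_trans (Nat.le_max_left _ _) (ih _)
theorem foldl_max_ge {l : List (List (Option String))} {c : List (Option String)} (acc : Nat)
    (h : c ∈ l) : c.length ≤ l.foldl (fun m c => max m c.length) acc := by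
  induction l generalizing acc with
  | nil => cases h
  | cons c' t ih =>
    rcases List.mem_cons.mp h with rfl | h
    · exact le_trans (Nat.le_max_right _ _) (foldl_max_acc t _)
    · exact ih _ h
theorem pvL_le (g : List (List (Option String))) (X : Nat) :
    pvL g X ≤ g.foldl (fun m c => max m c.length) 0 := by
  unfold pvL
  by_cases hX : X < g.length
  · rw [List.getD_eq_getElem _ _ hX]
    exact foldl_max_ge 0 (List.getElem_mem hX)
  · rw [List.getD_eq_default _ _ (by omega)]
    exact Nat.zero_le _

-- one cell of the scan
theorem cell_step {g : List (List (Option String))} {w : List String} {fuel X Y : Nat}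
    {col : List (Option String)} {word : Option String}
    {C : PySem.Set (Nat × Nat × String)} {chains : List (List String)}
    (hcol : g.getD X [] = col) (hword : col.getD Y none = word)
    (hfr : g.length - X < fuel) (hfd : pvL g X - Y < fuel)
    (hInv : pvInv g w C X Y) :
    ∃ C', (pvCellStarts g w X Y word col.length).foldl (pvAStep g w fuel) (C, chains)
          = (C', chains ++ pvCellChains g w X Y word col)
        ∧ pvInv g w C' X (Y + 1) := by
  have hcell : pvCell g X Y = word := by unfold pvCell; rw [hcol, hword]
  have hWw : pvW g w X Y = pvIsWord w word := by unfold pvW; rw [hcell]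
  have hlX : pvL g X = col.length := by unfold pvL; rw [hcol]
  unfold pvCellStarts pvCellChains
  by_cases hw0 : pvIsWord w word = true
  case neg =>
    have hw0' : pvIsWord w word = false := by simpa using hw0
    have hnSR : ¬ pvSR g w X Y := fun h => absurd h.1 (by rw [hWw, hw0']; simp)
    have hnSD : ¬ pvSD g w X Y := fun h => absurd h.1 (by rw [hWw, hw0']; simp)
    refine ⟨C, by rw [hw0']; simp, ?_⟩
    intro x y d
    rw [hInv x y d, CR_succ, CD_succ]
    simp [hnSR, hnSD]
  case pos =>
    have hW : pvW g w X Y = true := by rw [hWw]; exact hw0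
    rw [hw0]
    simp only [Bool.not_true, Bool.false_eq_true, if_false]
    set ar := decide (X < g.length - 2) && pvIsWord w (pvCell g (X + 1) Y) with har_def
    set lr := (X == 0 || decide ((g.getD (X - 1) []).length ≤ Y)
               || !(pvIsWord w (pvCell g (X - 1) Y))) with hlr_def
    set ad := decide (Y < col.length - 2) && pvIsWord w (col.getD (Y + 1) none) with had_def
    set ld := (Y == 0 || !(pvIsWord w (col.getD (Y - 1) none))) with hld_def
    -- the Bool tests mean exactly the start / run-leading predicates
    have hSRb : ar = true ↔ pvSR g w X Y := by
      rw [har_def, Bool.and_eq_true, decide_eq_true_iff]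
      unfold pvSR pvW
      constructor
      · rintro ⟨h1, h2⟩; exact ⟨hW, by omega, h2⟩
      · rintro ⟨_, h1, h2⟩; exact ⟨by omega, h2⟩
    have hSDb : ad = true ↔ pvSD g w X Y := by
      rw [had_def, Bool.and_eq_true, decide_eq_true_iff]
      unfold pvSD
      have hc1 : pvW g w X (Y + 1) = pvIsWord w (col.getD (Y + 1) none) := by
        unfold pvW pvCell; rw [hcol]
      rw [hc1, ← hlX]
      constructor
      · rintro ⟨h1, h2⟩; exact ⟨hW, by omega, h2⟩
      · rintro ⟨_, h1, h2⟩; exact ⟨by omega, h2⟩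
    have hLRb : lr = true ↔ pvLR g w X Y := by
      rw [hlr_def]
      unfold pvLR
      by_cases h0 : X = 0
      · simp [h0]
      · have h0b : (X == 0) = false := by simp [h0]
        rw [h0b]
        by_cases hl : (g.getD (X - 1) []).length ≤ Y
        · have hnone : pvCell g (X - 1) Y = none := by
            unfold pvCell; rw [List.getD_eq_default _ _ hl]
          simp [hl, h0, pvW, hnone, pvIsWord]
        · cases hx : pvIsWord w (pvCell g (X - 1) Y) with
          | false => simp [hl, h0, pvW, hx]
          | true =>
            simp [hl, h0, pvW, hx]
            exact Nat.lt_of_not_le hl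
    have hLDb : ld = true ↔ pvLD g w X Y := by
      rw [hld_def]
      unfold pvLD
      have hc1 : pvW g w X (Y - 1) = pvIsWord w (col.getD (Y - 1) none) := by
        unfold pvW pvCell; rw [hcol]
      by_cases h0 : Y = 0
      · simp [h0]
      · have h0b : (Y == 0) = false := by simp [h0]
        cases hx : pvIsWord w (col.getD (Y - 1) none) with
        | true =>
          simp [h0b, h0, hc1, hx]
          exact hx
        | false =>
          simp [h0b, h0, hc1, hx]
          exact hx
    -- RIGHT sub-step
    have hright : ∃ C1, List.foldl (pvAStep g w fuel) (C, chains)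
          (if ar = true then [(X, Y, "right")] else [])
        = (C1, chains ++ (if (ar && lr) = true then [pvRunRight g w X Y] else []))
        ∧ ∀ x y d, ((x, y, d) ∈ C1 ↔
            (d = "right" ∧ pvCR g w X (Y + 1) x y) ∨ (d = "down" ∧ pvCD g w X Y x y)) := by
      by_cases har : ar = true
      · have hSR := hSRb.mp har
        by_cases hlr : lr = true
        · have hLR := hLRb.mp hlr
          have hfree : ∀ i, (X + i, Y, "right") ∉ C := by
            intro i hm
            rcases (hInv _ _ _).mp hm with ⟨_, hcr⟩ | ⟨hd, _⟩
            · exact CR_free hLR i hcr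
            · exact absurd hd (by decide)
          obtain ⟨C1, hwalk, hmem1⟩ := walk_right fuel X C [] hfr hfree
          refine ⟨C1, ?_, ?_⟩
          · rw [if_pos har, if_pos (show (ar && lr) = true by rw [har, hlr]; rfl)]
            simp only [List.foldl_cons, List.foldl_nil, pvAStep]
            rw [hwalk]
            simp
          · intro x y d
            rw [hmem1 x y d, hInv x y d, CR_succ]
            constructor
            · rintro ((⟨hd, hcr⟩ | hdown) | ⟨hd, hb, h1, h2⟩)
              · exact Or.inl ⟨hd, Or.inl hcr⟩
              · exact Or.inr hdown
              · exact Or.inl ⟨hd, Or.inr ⟨hSR, hLR, hb, h1, h2⟩⟩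
            · rintro (⟨hd, hcr | ⟨_, _, hb, h1, h2⟩⟩ | hdown)
              · exact Or.inl (Or.inl ⟨hd, hcr⟩)
              · exact Or.inr ⟨hd, hb, h1, h2⟩
              · exact Or.inl (Or.inr hdown)
        · have hnLR : ¬ pvLR g w X Y := fun h => hlr (hLRb.mpr h)
          have hhit : (X, Y, "right") ∈ C :=
            (hInv X Y "right").mpr (Or.inl ⟨rfl, CR_hit hSR hnLR⟩)
          obtain ⟨f, rfl⟩ : ∃ f, fuel = f + 1 := ⟨fuel - 1, by omega⟩
          refine ⟨C, ?_, ?_⟩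
          · rw [if_pos har, if_neg (show ¬ ((ar && lr) = true) by
              rw [har, Bool.true_and]; exact fun h => hnLR (hLRb.mp h))]
            simp only [List.foldl_cons, List.foldl_nil, pvAStep]
            rw [walk_break hW hhit]
            simp
          · intro x y d
            rw [hInv x y d, CR_succ]
            simp [hnLR]
      · have hnSR : ¬ pvSR g w X Y := fun h => har (hSRb.mpr h)
        refine ⟨C, ?_, ?_⟩
        · rw [if_neg har, if_neg (show ¬ ((ar && lr) = true) by
            rw [Bool.and_eq_true]; rintro ⟨h, -⟩; exact har h)]
          simp
        · intro x y d
          rw [hInv x y d, CR_succ]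
          simp [hnSR]
    obtain ⟨C1, hreq, hinv1⟩ := hright
    -- DOWN sub-step
    have hdown : ∃ C2, List.foldl (pvAStep g w fuel) (C1, chains ++ (if (ar && lr) = true then [pvRunRight g w X Y] else []))
          (if ad = true then [(X, Y, "down")] else [])
        = (C2, (chains ++ (if (ar && lr) = true then [pvRunRight g w X Y] else []))
               ++ (if (ad && ld) = true then [pvRunDown col w Y] else []))
        ∧ pvInv g w C2 X (Y + 1) := by
      by_cases had : ad = true
      · have hSD := hSDb.mp had
        by_cases hld : ld = true
        · have hLD := hLDb.mp hld
          have hfree : ∀ j, (X, Y + j, "down") ∉ C1 := by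
            intro j hm
            rcases (hinv1 _ _ _).mp hm with ⟨hd, _⟩ | ⟨_, hcd⟩
            · exact absurd hd (by decide)
            · exact CD_free hLD j hcd
          obtain ⟨C2, hwalk, hmem2⟩ := walk_down fuel Y C1 [] (by rw [hlX] at hfd; rw [hlX]; exact hfd) hfree
          refine ⟨C2, ?_, ?_⟩
          · rw [if_pos had, if_pos (show (ad && ld) = true by rw [had, hld]; rfl)]
            simp only [List.foldl_cons, List.foldl_nil, pvAStep]
            rw [hwalk]
            rw [show (g.getD X []) = col from hcol]
            simp
          · intro x y d
            rw [hmem2 x y d, hinv1 x y d, CD_succ]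
            constructor
            · rintro ((hrt | ⟨hd, hcd⟩) | ⟨hd, ha, h1, h2⟩)
              · exact Or.inl hrt
              · exact Or.inr ⟨hd, Or.inl hcd⟩
              · exact Or.inr ⟨hd, Or.inr ⟨hSD, hLD, ha, h1, h2⟩⟩
            · rintro (hrt | ⟨hd, hcd | ⟨_, _, ha, h1, h2⟩⟩)
              · exact Or.inl (Or.inl hrt)
              · exact Or.inl (Or.inr ⟨hd, hcd⟩)
              · exact Or.inr ⟨hd, ha, h1, h2⟩
        · have hnLD : ¬ pvLD g w X Y := fun h => hld (hLDb.mpr h)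
          have hhit : (X, Y, "down") ∈ C1 :=
            (hinv1 X Y "down").mpr (Or.inr ⟨rfl, CD_hit hSD hnLD⟩)
          obtain ⟨f, rfl⟩ : ∃ f, fuel = f + 1 := ⟨fuel - 1, by omega⟩
          refine ⟨C1, ?_, ?_⟩
          · rw [if_pos had, if_neg (show ¬ ((ad && ld) = true) by
              rw [had, Bool.true_and]; exact fun h => hnLD (hLDb.mp h))]
            simp only [List.foldl_cons, List.foldl_nil, pvAStep]
            rw [walk_break hW hhit]
            simp
          · intro x y d
            rw [hinv1 x y d, CD_succ]
            simp [hnLD]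
      · have hnSD : ¬ pvSD g w X Y := fun h => had (hSDb.mpr h)
        refine ⟨C1, ?_, ?_⟩
        · rw [if_neg had, if_neg (show ¬ ((ad && ld) = true) by
            rw [Bool.and_eq_true]; rintro ⟨h, -⟩; exact had h)]
          simp
        · intro x y d
          rw [hinv1 x y d, CD_succ]
          simp [hnSD]
    obtain ⟨C2, hdeq, hinv2⟩ := hdown
    refine ⟨C2, ?_, hinv2⟩
    have hadc : (decide (Y < col.length - 2) && pvIsWord w (pvCell g X (Y + 1))) = ad := by
      rw [had_def]; unfold pvCell; rw [hcol]
    rw [List.foldl_append, hreq, hadc, hdeq, List.append_assoc]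

theorem col_loop {g : List (List (Option String))} {w : List String} {fuel X : Nat}
    {col : List (Option String)} (hcol : g.getD X [] = col)
    (hfr : g.length - X < fuel) (hfd : pvL g X < fuel) :
    ∀ (cells : List (Option String)) (Y : Nat) (C : PySem.Set (Nat × Nat × String))
      (chains : List (List String)), col.drop Y = cells → pvInv g w C X Y →
    ∃ C', List.foldl (fun st q => List.foldl (pvAStep g w fuel) st (pvCellStarts g w X q.1 q.2 col.length))
            (C, chains) (pvEnum Y cells)
        = (C', chains ++ (pvEnum Y cells).flatMap (fun q => pvCellChains g w X q.1 q.2 col))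
      ∧ pvInv g w C' X (Y + cells.length) := by
  intro cells
  induction cells with
  | nil =>
    intro Y C chains _ hInv
    exact ⟨C, by simp [pvEnum], by simpa using hInv⟩
  | cons c cs ih =>
    intro Y C chains hdrop hInv
    have hword : col.getD Y none = c := drop_getD none hdrop
    obtain ⟨C1, heq1, hinv1⟩ := cell_step hcol hword hfr (by omega) hInv
    obtain ⟨C2, heq2, hinv2⟩ := ih (Y + 1) C1 (chains ++ pvCellChains g w X Y c col)
      (drop_succ hdrop) hinv1
    refine ⟨C2, ?_, ?_⟩
    · show List.foldl _ (List.foldl (pvAStep g w fuel) (C, chains) (pvCellStarts g w X Y c col.length))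
        (pvEnum (Y + 1) cs) = _
      rw [heq1, heq2]
      simp [pvEnum, List.append_assoc]
    · rw [show Y + (c :: cs).length = Y + 1 + cs.length by simp; omega]
      exact hinv2

theorem inv_col_end {g : List (List (Option String))} {w : List String} {X : Nat}
    {C : PySem.Set (Nat × Nat × String)} (h : pvInv g w C X (pvL g X)) :
    pvInv g w C (X + 1) 0 := by
  intro x y d
  rw [h x y d, CR_col_end le_rfl, CD_col_end le_rfl]

theorem grid_loop {g : List (List (Option String))} {w : List String} {fuel : Nat}
    (hf : g.length < fuel) (hfc : ∀ x, pvL g x < fuel) :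
    ∀ (cols : List (List (Option String))) (X : Nat) (C : PySem.Set (Nat × Nat × String))
      (chains : List (List String)), g.drop X = cols → pvInv g w C X 0 →
    ∃ C', List.foldl (fun st p =>
            List.foldl (fun st q => List.foldl (pvAStep g w fuel) st (pvCellStarts g w p.1 q.1 q.2 p.2.length))
              st (pvEnum 0 p.2)) (C, chains) (pvEnum X cols)
        = (C', chains ++ (pvEnum X cols).flatMap (fun p =>
            (pvEnum 0 p.2).flatMap (fun q => pvCellChains g w p.1 q.1 q.2 p.2)))
      ∧ pvInv g w C' (X + cols.length) 0 := by
  intro cols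
  induction cols with
  | nil =>
    intro X C chains _ hInv
    exact ⟨C, by simp [pvEnum], by simpa using hInv⟩
  | cons col cols' ih =>
    intro X C chains hdrop hInv
    have hcol : g.getD X [] = col := drop_getD [] hdrop
    have hlX : pvL g X = col.length := by unfold pvL; rw [hcol]
    obtain ⟨C1, heq1, hinv1⟩ := col_loop hcol (by omega) (hfc X) col 0 C chains rfl hInv
    have hinv1' : pvInv g w C1 (X + 1) 0 := inv_col_end (by rw [hlX]; simpa using hinv1)
    obtain ⟨C2, heq2, hinv2⟩ := ih (X + 1) C1
      (chains ++ (pvEnum 0 col).flatMap (fun q => pvCellChains g w X q.1 q.2 col))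
      (drop_succ hdrop) hinv1'
    refine ⟨C2, ?_, ?_⟩
    · show List.foldl _ (List.foldl (fun st q => List.foldl (pvAStep g w fuel) st
          (pvCellStarts g w X q.1 q.2 col.length)) (C, chains) (pvEnum 0 col))
        (pvEnum (X + 1) cols') = _
      rw [heq1, heq2]
      simp [pvEnum, List.append_assoc]
    · rw [show X + (col :: cols').length = X + 1 + cols'.length by simp; omega]
      exact hinv2

theorem inv_empty (g : List (List (Option String))) (w : List String) :
    pvInv g w (PySem.Set.empty : PySem.Set (Nat × Nat × String)) 0 0 := by
  intro x y d
  constructor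
  · intro hm; cases hm
  · rintro (⟨_, x0, hproc, _⟩ | ⟨_, y0, hproc, _⟩) <;>
      rcases hproc with h | ⟨_, h⟩ <;> omega

theorem pv_equiv_total : ∀ (grid : List (List (Option String))) (words : List String),
    get_word_chains grid words = get_word_chains_alt grid words := by
  intro g w
  unfold get_word_chains
  rw [startsA_eq, foldl_flatMap]
  simp only [foldl_flatMap]
  rw [show (fun (st : PySem.Set (Nat × Nat × String) × List (List String)) (s : Nat × Nat × String) =>
        ((pvWalkA g w (g.length + List.foldl (fun m c => max m c.length) 0 g + 1) st.1 s.1 s.2.1 s.2.2 []).1,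
          if (pvWalkA g w (g.length + List.foldl (fun m c => max m c.length) 0 g + 1) st.1 s.1 s.2.1 s.2.2 []).2.2 = true
          then st.2
          else st.2 ++ [(pvWalkA g w (g.length + List.foldl (fun m c => max m c.length) 0 g + 1) st.1 s.1 s.2.1 s.2.2 []).2.1]))
      = pvAStep g w (g.length + List.foldl (fun m c => max m c.length) 0 g + 1) from rfl]
  obtain ⟨C', heq, -⟩ := grid_loop (fuel := g.length + g.foldl (fun m c => max m c.length) 0 + 1)
    (by omega) (fun x => by have := pvL_le g x; omega) g 0 PySem.Set.empty [] List.drop_zero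
    (inv_empty g w)
  rw [heq, alt_eq]
  simp

-- ===== VERDICT (by name: the statement is the Claim_ definition above) =====
theorem get_word_chains_spec : Claim_equal_get_word_chains := by
  intro grid words _ _
  unfold Spec_get_word_chains
  exact pv_equiv_total grid words
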